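-- pv_equiv track=rewrite | github.com/hafsaghannaj/OperationalDecisionSupportSystemForWaterSecurity | src/outbreaks/cag/engine.py | markdown_blocks
-- ===== SOURCE A (Python) =====
-- def markdown_blocks(text: str) -> list[str]:
--     blocks: list[str] = []
--     current: list[str] = []
--
--     for raw_line in text.splitlines():
--         line = raw_line.strip()
--         if not line:
--             if current:
--                 blocks.append(" ".join(current))
--                 current = []
--             continue
--
--         if line.startswith("#"):
--             if current:
--                 blocks.append(" ".join(current))
--             current = [line.lstrip("# ").strip()]
--             continue
--
--         current.append(line.lstrip("- ").strip())
--
--     if current: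
--         blocks.append(" ".join(current))
--     return [block for block in blocks if block]
-- ===== SOURCE B (Python) =====
-- def _clean(line: str) -> str:
--     if line.startswith("#"):
--         return line.lstrip("# ").strip()
--     return line.lstrip("- ").strip()
--
--
-- def markdown_blocks(text: str) -> list[str]:
--     # pass 1: normalize every line into a stream of boundary markers (None)
--     # and cleaned word-tokens; a header emits a boundary followed by its token
--     tokens: list = []
--     for raw_line in text.splitlines():
--         line = raw_line.strip()
--         if not line:
--             tokens.append(None)
--         elif line.startswith("#"):
--             tokens.append(None)
--             tokens.append(_clean(line))
--         else:
--             tokens.append(_clean(line))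
--     # pass 2: split the token stream on boundaries, join each group, drop empties
--     out: list[str] = []
--     buf: list[str] = []
--     for tok in tokens + [None]:
--         if tok is None:
--             joined = " ".join(buf)
--             if joined:
--                 out.append(joined)
--             buf = []
--         else:
--             buf.append(tok)
--     return out
-- ===== Notes on version B (the rewrite author's own statement) =====
-- stated objective: alternative
-- what changed: Replaces A's single accumulate-and-flush scan (flush logic duplicated at blank lines, headers and end-of-input, plus a final filter pass) by a two-pass pipeline: first normalize the lines into a flat stream of cleaned tokens and boundary markers (a header emits a boundary before its token), then split that stream on boundaries, joining each group and dropping empty joins as they are produced.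
import Mathlib
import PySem

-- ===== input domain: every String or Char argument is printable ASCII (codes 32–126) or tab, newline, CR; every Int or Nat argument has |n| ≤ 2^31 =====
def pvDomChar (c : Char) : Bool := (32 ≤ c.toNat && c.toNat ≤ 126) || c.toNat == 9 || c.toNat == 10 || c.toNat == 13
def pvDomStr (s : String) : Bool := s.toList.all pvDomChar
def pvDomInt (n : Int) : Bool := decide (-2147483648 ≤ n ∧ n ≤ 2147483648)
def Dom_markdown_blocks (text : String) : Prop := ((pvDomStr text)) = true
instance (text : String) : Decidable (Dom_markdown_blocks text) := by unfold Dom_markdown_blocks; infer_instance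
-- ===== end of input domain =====

-- B restructures A's accumulate-and-flush scan into a two-pass pipeline (normalize to a
-- token/boundary stream, then split on boundaries); same result, proved equal on all inputs.

-- line.lstrip("# ") : hand port of str.lstrip with a chars set (exact: drops leading '#'/' ')
def pvLstripHash (cs : List Char) : List Char := cs.dropWhile (fun c => c == '#' || c == ' ')
-- line.lstrip("- ") : hand port of str.lstrip with a chars set (exact: drops leading '-'/' ')
def pvLstripDash (cs : List Char) : List Char := cs.dropWhile (fun c => c == '-' || c == ' ')

-- ===== PORT A =====
-- one iteration of A's for-loop over (blocks, current)
def pvStepA (st : List String × List String) (raw_line : String) : List String × List String :=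
  let line := PySem.Str.strip raw_line
  if line = "" then
    if st.2 ≠ [] then (st.1 ++ [PySem.Str.join " " st.2], []) else st
  else if PySem.Str.startswith line "#" then
    ((if st.2 ≠ [] then st.1 ++ [PySem.Str.join " " st.2] else st.1),
     [PySem.Str.strip (String.ofList (pvLstripHash line.toList))])
  else
    (st.1, st.2 ++ [PySem.Str.strip (String.ofList (pvLstripDash line.toList))])

def markdown_blocks (text : String) : List String :=
  let st := (PySem.Str.splitlines text).foldl pvStepA ([], [])
  let blocks := if st.2 ≠ [] then st.1 ++ [PySem.Str.join " " st.2] else st.1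
  blocks.filter (fun block => block ≠ "")

-- ===== PORT B =====
-- Source B's _clean helper
def pvClean (line : String) : String :=
  if PySem.Str.startswith line "#" then
    PySem.Str.strip (String.ofList (pvLstripHash line.toList))
  else
    PySem.Str.strip (String.ofList (pvLstripDash line.toList))

-- pass 1 loop body: tokens emitted for one raw line
def pvTok (raw_line : String) : List (Option String) :=
  let line := PySem.Str.strip raw_line
  if line = "" then [none]
  else if PySem.Str.startswith line "#" then [none, some (pvClean line)]
  else [some (pvClean line)]

-- pass 2 loop body over (out, buf)
def pvStepB (st : List String × List String) (tok : Option String) : List String × List String :=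
  match tok with
  | none =>
      let joined := PySem.Str.join " " st.2
      ((if joined ≠ "" then st.1 ++ [joined] else st.1), [])
  | some t => (st.1, st.2 ++ [t])

def markdown_blocks_alt (text : String) : List String :=
  let tokens := (PySem.Str.splitlines text).flatMap pvTok
  ((tokens ++ [none]).foldl pvStepB ([], [])).1

-- ===== PRECONDITION & SPEC =====
def Spec_markdown_blocks (text : String) (out : List String) : Prop := out = markdown_blocks_alt text
instance (text : String) (out : List String) : Decidable (Spec_markdown_blocks text out) := by unfold Spec_markdown_blocks; infer_instance

-- ===== CLAIM (what is proved, stated in full; the proofs are below) =====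
def Claim_equal_markdown_blocks : Prop := ∀ (text : String), Dom_markdown_blocks text → Spec_markdown_blocks text (markdown_blocks text)

-- ===== LEMMAS AND PROOFS =====

-- the relation between A's state (blocks, current) and B's state (out, buf)
def pvRel (a b : List String × List String) : Prop :=
  b.1 = a.1.filter (fun s => s ≠ "") ∧ b.2 = a.2

theorem pvJoin_nil : PySem.Str.join " " [] = "" := rfl

-- A's flush (append-if-nonempty then clear) corresponds to B's boundary step
theorem pvRel_flush (a b : List String × List String) (h : pvRel a b) :
    pvRel ((if a.2 ≠ [] then a.1 ++ [PySem.Str.join " " a.2] else a.1), []) (pvStepB b none) := by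
  obtain ⟨h1, h2⟩ := h
  refine ⟨?_, by simp [pvStepB]⟩
  by_cases hc : a.2 = []
  · simp [pvStepB, hc, h1, h2, pvJoin_nil]
  · simp only [pvStepB, h1, h2, hc, ne_eq, not_false_eq_true, if_pos, List.filter_append]
    by_cases hj : PySem.Str.join " " a.2 = "" <;> simp [hj]

theorem pvRel_step (a b : List String × List String) (l : String) (h : pvRel a b) :
    pvRel (pvStepA a l) (pvTok l |>.foldl pvStepB b) := by
  unfold pvStepA pvTok
  by_cases he : PySem.Str.strip l = ""
  · rw [if_pos he, if_pos he]
    simp only [List.foldl_cons, List.foldl_nil]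
    by_cases hc : a.2 = []
    · rw [if_neg (by simp [hc])]
      obtain ⟨h1, h2⟩ := h
      exact ⟨by simp [pvStepB, h1, h2, hc, pvJoin_nil], by simp [pvStepB, hc]⟩
    · rw [if_pos hc]
      have hf := pvRel_flush a b h
      rwa [if_pos hc] at hf
  · rw [if_neg he, if_neg he]
    by_cases hh : PySem.Str.startswith (PySem.Str.strip l) "#" = true
    · rw [if_pos hh, if_pos hh]
      simp only [List.foldl_cons, List.foldl_nil]
      have hcl : pvClean (PySem.Str.strip l)
          = PySem.Str.strip (String.ofList (pvLstripHash (PySem.Str.strip l).toList)) := by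
        unfold pvClean; rw [if_pos hh]
      refine ⟨?_, by simp [pvStepB, hcl]⟩
      have := (pvRel_flush a b h).1
      simpa [pvStepB] using this
    · rw [if_neg hh, if_neg hh]
      simp only [List.foldl_cons, List.foldl_nil]
      have hcl : pvClean (PySem.Str.strip l)
          = PySem.Str.strip (String.ofList (pvLstripDash (PySem.Str.strip l).toList)) := by
        unfold pvClean; rw [if_neg hh]
      obtain ⟨h1, h2⟩ := h
      exact ⟨by simp [pvStepB, h1], by simp [pvStepB, h2, hcl]⟩

theorem pvRel_foldl (ls : List String) (a b : List String × List String) (h : pvRel a b) :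
    pvRel (ls.foldl pvStepA a) ((ls.flatMap pvTok).foldl pvStepB b) := by
  induction ls generalizing a b with
  | nil => simpa using h
  | cons l ls ih =>
      simp only [List.foldl_cons, List.flatMap_cons, List.foldl_append]
      exact ih _ _ (pvRel_step a b l h)

-- ===== VERDICT (by name: the statement is the Claim_ definition above) =====
theorem markdown_blocks_spec : Claim_equal_markdown_blocks := by
  intro text _
  unfold Spec_markdown_blocks markdown_blocks markdown_blocks_alt
  have h := pvRel_foldl (PySem.Str.splitlines text) ([], []) ([], []) (by simp [pvRel])
  dsimp only
  rw [List.foldl_append]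
  generalize hA : List.foldl pvStepA ([], []) (PySem.Str.splitlines text) = a at h ⊢
  generalize hB : List.foldl pvStepB ([], []) (List.flatMap pvTok (PySem.Str.splitlines text)) = b at h ⊢
  simp only [List.foldl_cons, List.foldl_nil]
  exact ((pvRel_flush a b h).1).symm
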